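-- pv_equiv track=rewrite | github.com/kerneltrick/competitive-programming | test_bench/maximumsubarrays.py | count
-- ===== SOURCE A (Python) =====
-- def count(array, sum):
--     count = 0
--     s = 0
--     for a in array[::-1]:
--         s+=a
--         count+=1
--         if s == sum:
--             break
--     return count
-- ===== SOURCE B (Python) =====
-- def count(array, sum):
--     rev = array[::-1]
--     cums = []
--     s = 0
--     for a in rev:
--         s += a
--         cums.append(s)
--     if sum in cums:
--         return cums.index(sum) + 1
--     return len(array)
-- ===== Notes on version B (the rewrite author's own statement) =====
-- stated objective: alternative
-- what changed: A's single early-breaking accumulate-and-compare loop is replaced by a build-then-search decomposition: B first materialises the full table of reversed cumulative sums, then answers with a membership/index lookup on that table (len(array) if absent).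
import Mathlib
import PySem

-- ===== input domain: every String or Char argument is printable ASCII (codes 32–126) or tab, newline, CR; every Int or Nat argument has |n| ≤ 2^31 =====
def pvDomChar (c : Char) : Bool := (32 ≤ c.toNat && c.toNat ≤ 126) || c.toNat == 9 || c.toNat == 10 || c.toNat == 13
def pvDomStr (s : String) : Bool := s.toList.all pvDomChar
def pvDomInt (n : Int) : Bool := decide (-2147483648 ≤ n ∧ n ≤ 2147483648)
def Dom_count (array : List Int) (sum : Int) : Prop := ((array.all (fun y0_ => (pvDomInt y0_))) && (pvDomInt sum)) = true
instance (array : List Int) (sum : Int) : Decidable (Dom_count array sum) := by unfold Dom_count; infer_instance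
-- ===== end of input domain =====

-- B replaces A's early-breaking accumulate-and-compare loop by building the full
-- table of reversed cumulative sums and then doing a membership/index lookup
-- (objective: alternative decomposition, same cost).

-- ===== PORT A =====
-- the for-loop of A with its break: state (s, count), stops when s == sum
def countLoopA (sum : Int) (l : List Int) (s : Int) (c : Int) : Int :=
  match l with
  | [] => c
  | a :: t =>
    let s' := s + a
    let c' := c + 1
    if s' = sum then c' else countLoopA sum t s' c'

def count (array : List Int) (sum : Int) : Int :=
  -- array[::-1] (step -1 is never 0, so getD [] is never taken)
  countLoopA sum ((PySem.List.slice? array none none (-1)).getD []) 0 0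

-- ===== PORT B =====
-- the cums-building loop of Source B: foldl over rev with state (cums, s)
def count_alt (array : List Int) (sum : Int) : Int :=
  let rev := (PySem.List.slice? array none none (-1)).getD []
  let cs := rev.foldl (fun (st : List Int × Int) a => (st.1 ++ [st.2 + a], st.2 + a)) ([], 0)
  match PySem.List.index? cs.1 sum with
  | some i => (i : Int) + 1
  | none => (array.length : Int)

-- ===== PRECONDITION & SPEC =====
def Spec_count (array : List Int) (sum : Int) (out : Int) : Prop := out = count_alt array sum
instance (array : List Int) (sum : Int) (out : Int) : Decidable (Spec_count array sum out) := by unfold Spec_count; infer_instance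

-- ===== CLAIM (what is proved, stated in full; the proofs are below) =====
def Claim_equal_count : Prop := ∀ (array : List Int) (sum : Int), Dom_count array sum → Spec_count array sum (count array sum)

-- ===== LEMMAS AND PROOFS =====

-- clean recursive form of the prefix-sum table starting at s
def psums (l : List Int) (s : Int) : List Int :=
  match l with
  | [] => []
  | a :: t => (s + a) :: psums t (s + a)

-- Source B's fold builds acc ++ psums l s
theorem foldl_cums (l : List Int) (s : Int) (acc : List Int) :
    (l.foldl (fun (st : List Int × Int) a => (st.1 ++ [st.2 + a], st.2 + a)) (acc, s)).1
      = acc ++ psums l s := by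
  induction l generalizing s acc with
  | nil => simp [psums]
  | cons a t ih => simp [psums, ih]

-- A's break-loop computed from the table lookup
theorem loopA_eq_lookup (sum : Int) (l : List Int) (s c : Int) :
    countLoopA sum l s c =
      match PySem.List.index? (psums l s) sum with
      | some i => c + (i : Int) + 1
      | none => c + (l.length : Int) := by
  induction l generalizing s c with
  | nil => simp [countLoopA, psums, PySem.List.index?]
  | cons a t ih =>
    by_cases h : s + a = sum
    · rw [show psums (a :: t) s = (s + a) :: psums t (s + a) from rfl, h,
        PySem.List.index?_cons_self]
      simp [countLoopA, h]
    · rw [show psums (a :: t) s = (s + a) :: psums t (s + a) from rfl,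
        PySem.List.index?_cons_of_ne _ h]
      simp only [countLoopA, if_neg h, ih]
      cases PySem.List.index? (psums t (s + a)) sum with
      | none => simp only [Option.map_none, List.length_cons]; push_cast; ring
      | some i => simp only [Option.map_some]; push_cast; ring

-- ===== VERDICT (by name: the statement is the Claim_ definition above) =====
theorem count_spec : Claim_equal_count := by
  unfold Claim_equal_count
  intro array sum _
  unfold Spec_count count count_alt
  rw [PySem.List.slice?_none_none_neg_one]
  simp only [Option.getD_some]
  rw [foldl_cums, List.nil_append, loopA_eq_lookup]
  cases PySem.List.index? (psums array.reverse 0) sum with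
  | none => simp
  | some i => simp
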